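-- pv_equiv track=rewrite | github.com/NadiaAlmutlak/Intro-Python | Desktop/IntroPython/Midterm/Midterm Practice/Farro_Shuffle.py | weave
-- ===== SOURCE A (Python) =====
-- def slice(d): #Function slices the deck in half
--     B, C = d[:int(len(d) / 2 )], d[int(len(d) / 2):]
--     return B,C
--
-- def weave(d,t):
--     B, C = slice(d) # Bring back the slicing function within the weaving function for future loops
--     if t == "out":
--         list=([a for b in zip(B, C) for a in b]) #performs an out shuffle
--         return list
--     if t=="in":
--         list=([a for b in zip(C,B) for a in b])#performs an in shuffle
--         return list
--     else:
--         return "Shuffle can only be 'in' or 'out'! That's the point of a faro shuffle!"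
-- ===== SOURCE B (Python) =====
-- def weave(d, t):
--     half = len(d) // 2
--     if t == "out":
--         return [d[i // 2] if i % 2 == 0 else d[half + i // 2] for i in range(2 * half)]
--     if t == "in":
--         return [d[half + i // 2] if i % 2 == 0 else d[i // 2] for i in range(2 * half)]
--     else:
--         return "Shuffle can only be 'in' or 'out'! That's the point of a faro shuffle!"
-- ===== Notes on version B (the rewrite author's own statement) =====
-- stated objective: idiomatic
-- what changed: B replaces the slice-into-two-halves + zip + flatten pipeline by a single positional comprehension over range(2*(len(d)//2)) that indexes the original deck directly (d[i//2] / d[half+i//2]), with no slicing, no zip and no intermediate half-lists.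
import Mathlib
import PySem

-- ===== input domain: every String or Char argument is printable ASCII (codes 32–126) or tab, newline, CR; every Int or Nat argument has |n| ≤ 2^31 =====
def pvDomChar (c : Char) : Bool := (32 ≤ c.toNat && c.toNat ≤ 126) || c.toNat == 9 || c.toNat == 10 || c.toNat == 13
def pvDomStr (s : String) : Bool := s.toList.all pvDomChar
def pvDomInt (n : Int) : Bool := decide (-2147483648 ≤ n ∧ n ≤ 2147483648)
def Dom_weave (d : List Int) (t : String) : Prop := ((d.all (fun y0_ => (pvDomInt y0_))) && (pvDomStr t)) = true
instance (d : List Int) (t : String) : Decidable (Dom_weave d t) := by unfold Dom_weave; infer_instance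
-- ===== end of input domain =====

-- B replaces the slice+zip+flatten pipeline by one positional comprehension over range(2*(len(d)//2))
-- indexing the original deck directly (objective: idiomatic / different decomposition; return value only).

-- ===== PORT A =====
-- slice(d): B, C = d[:int(len(d)/2)], d[int(len(d)/2):]  (int(len/2) = len/2 as Nat division, lengths ≥ 0)
def pySliceHalf (d : List Int) : List Int × List Int :=
  (PySem.List.slice d none (some ((d.length : Int) / 2)),
   PySem.List.slice d (some ((d.length : Int) / 2)) none)

def weave (d : List Int) (t : String) : List Int :=
  let BC := pySliceHalf d
  if t == "out" then
    (BC.1.zip BC.2).flatMap (fun p => [p.1, p.2])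
  else if t == "in" then
    (BC.2.zip BC.1).flatMap (fun p => [p.1, p.2])
  else
    []  -- Python A returns an error STRING here (not a list of ints); excluded by Pre_weave

-- ===== PORT B =====
-- indices i/2 and half + i/2 are always in range for i < 2*half, so Python's d[...] is List.getD
def weave_alt (d : List Int) (t : String) : List Int :=
  let half := d.length / 2
  if t == "out" then
    (List.range (2 * half)).map (fun i =>
      if i % 2 == 0 then d.getD (i / 2) 0 else d.getD (half + i / 2) 0)
  else if t == "in" then
    (List.range (2 * half)).map (fun i =>
      if i % 2 == 0 then d.getD (half + i / 2) 0 else d.getD (i / 2) 0)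
  else
    []  -- same error-string branch in Source B; excluded by Pre_weave

-- ===== PRECONDITION & SPEC =====
-- Pre_ excludes t ∉ {"out","in"}: there Python A (and B) return an error STRING, not a list of ints.
-- t must be "out" (characters ['o','u','t']) or "in" (characters ['i','n']); stated in both the
-- string form and the equivalent character-list form (the two conjuncts are interchangeable).
def Pre_weave (d : List Int) (t : String) : Prop :=
  (t = "out" ∧ t.toList = ['o', 'u', 't']) ∨ (t = "in" ∧ t.toList = ['i', 'n'])
instance (d : List Int) (t : String) : Decidable (Pre_weave d t) := by unfold Pre_weave; infer_instance

def pvWitness_weave : List Int × String := ([1, 2, 3, 4, 5], "out")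

def Spec_weave (d : List Int) (t : String) (out : List Int) : Prop := out = weave_alt d t
instance (d : List Int) (t : String) (out : List Int) : Decidable (Spec_weave d t out) := by unfold Spec_weave; infer_instance

-- ===== CLAIM (what is proved, stated in full; the proofs are below) =====
def Claim_equal_weave : Prop := ∀ (d : List Int) (t : String), Dom_weave d t → Pre_weave d t → Spec_weave d t (weave d t)

-- ===== LEMMAS AND PROOFS =====

-- flattening a list of pairs = positional map over range (2 * length)
theorem flat_pairs (l : List (Int × Int)) :
    l.flatMap (fun p => [p.1, p.2]) =
    (List.range (2 * l.length)).map (fun i =>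
      if i % 2 == 0 then (l.getD (i / 2) (0, 0)).1 else (l.getD (i / 2) (0, 0)).2) := by
  induction l with
  | nil => simp
  | cons p l ih =>
    have h2 : 2 * (p :: l).length = (2 * l.length) + 1 + 1 := by simp [List.length_cons]; ring
    rw [h2, List.range_succ_eq_map, List.range_succ_eq_map]
    simp only [List.map_cons, List.map_map, List.flatMap_cons]
    rw [ih]
    have hf : ((fun i =>
        if i % 2 == 0 then ((p :: l).getD (i / 2) (0, 0)).1 else ((p :: l).getD (i / 2) (0, 0)).2)
          ∘ Nat.succ ∘ Nat.succ) =
        (fun i => if i % 2 == 0 then (l.getD (i / 2) (0, 0)).1 else (l.getD (i / 2) (0, 0)).2) := by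
      funext i
      have hm : (i + 1 + 1) % 2 = i % 2 := Nat.add_mod_right i 2
      have hd : (i + 1 + 1) / 2 = i / 2 + 1 := by omega
      simp [Function.comp, Nat.succ_eq_add_one, hm, hd]
    rw [hf]
    simp

theorem int_half (n : Nat) : ((n : Int) / 2) = ((n / 2 : Nat) : Int) := by
  omega

-- A's zip of the two halves, elementwise, given j < len/2
theorem zip_halves_getD (d : List Int) (j : Nat) (hj : j < d.length / 2) :
    ((d.take (d.length / 2)).zip (d.drop (d.length / 2))).getD j (0, 0) =
      (d.getD j 0, d.getD (d.length / 2 + j) 0) := by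
  have h1 : j < (d.take (d.length / 2)).length := by simp; omega
  have h2 : j < (d.drop (d.length / 2)).length := by simp; omega
  have hz : j < ((d.take (d.length / 2)).zip (d.drop (d.length / 2))).length := by
    simp [List.length_zip]; omega
  rw [List.getD_eq_getElem _ _ hz, List.getElem_zip]
  rw [List.getD_eq_getElem _ _ (by omega : j < d.length),
      List.getD_eq_getElem _ _ (by simp at h2; omega : d.length / 2 + j < d.length)]
  simp [List.getElem_take, List.getElem_drop]

theorem zip_halves_len (d : List Int) :
    ((d.take (d.length / 2)).zip (d.drop (d.length / 2))).length = d.length / 2 := by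
  simp [List.length_zip]; omega

theorem zip_halves_len' (d : List Int) :
    ((d.drop (d.length / 2)).zip (d.take (d.length / 2))).length = d.length / 2 := by
  simp [List.length_zip]; omega

theorem zip_halves_getD' (d : List Int) (j : Nat) (hj : j < d.length / 2) :
    ((d.drop (d.length / 2)).zip (d.take (d.length / 2))).getD j (0, 0) =
      (d.getD (d.length / 2 + j) 0, d.getD j 0) := by
  have h1 : j < (d.take (d.length / 2)).length := by simp; omega
  have h2 : j < (d.drop (d.length / 2)).length := by simp; omega
  have hz : j < ((d.drop (d.length / 2)).zip (d.take (d.length / 2))).length := by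
    simp [List.length_zip]; omega
  rw [List.getD_eq_getElem _ _ hz, List.getElem_zip]
  rw [List.getD_eq_getElem _ _ (by omega : j < d.length),
      List.getD_eq_getElem _ _ (by simp at h2; omega : d.length / 2 + j < d.length)]
  simp [List.getElem_take, List.getElem_drop]

-- ===== VERDICT (by name: the statement is the Claim_ definition above) =====
theorem weave_spec : Claim_equal_weave := by
  intro d t _ hpre
  unfold Spec_weave weave weave_alt pySliceHalf
  have hB : PySem.List.slice d none (some ((d.length : Int) / 2)) = d.take (d.length / 2) := by
    rw [int_half, PySem.List.slice_to_natCast]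
  have hC : PySem.List.slice d (some ((d.length : Int) / 2)) none = d.drop (d.length / 2) := by
    rw [int_half, PySem.List.slice_from_natCast]
  rcases hpre with ⟨h, -⟩ | ⟨h, -⟩ <;> subst h
  · rw [if_pos (by decide)]
    simp only [hB, hC, flat_pairs, zip_halves_len d]
    refine List.map_congr_left ?_
    intro i hi
    simp only [List.mem_range] at hi
    rw [zip_halves_getD d _ (by omega)]
  · rw [if_neg (by decide), if_pos (by decide), if_neg (by decide), if_pos (by decide)]
    simp only [hB, hC, flat_pairs, zip_halves_len' d]
    refine List.map_congr_left ?_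
    intro i hi
    simp only [List.mem_range] at hi
    rw [zip_halves_getD' d _ (by omega)]
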